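-- pv_equiv track=rewrite | github.com/sandeep-krishna/100DaysOfCode | Day 06/BracketSequences.py | solve
-- ===== SOURCE A (Python) =====
-- def solve(s):
--     p=0
--     t=0
--     res = 0
--     for i in s:
--         if(i=='('):
--             p+=1
--         else:
--             p-=1;
--         if (p<t):
--             t=p
--             res = 0
--         if(t==p):
--             res+=1
--     if p:
--         return 0
--     else:
--         return res
-- ===== SOURCE B (Python) =====
-- def solve(s):
--     ps = []
--     b = 0
--     for c in s:
--         b += 1 if c == '(' else -1
--         ps.append(b)
--     if not ps or b != 0:
--         return 0
--     m = min(ps)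
--     return ps.count(m)
-- ===== Notes on version B (the rewrite author's own statement) =====
-- stated objective: alternative
-- what changed: A fuses running-minimum tracking and an incrementally-reset counter into one pass; B first materialises the list of prefix balances, then takes its minimum and counts occurrences of that minimum with min()/count().
import Mathlib
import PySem

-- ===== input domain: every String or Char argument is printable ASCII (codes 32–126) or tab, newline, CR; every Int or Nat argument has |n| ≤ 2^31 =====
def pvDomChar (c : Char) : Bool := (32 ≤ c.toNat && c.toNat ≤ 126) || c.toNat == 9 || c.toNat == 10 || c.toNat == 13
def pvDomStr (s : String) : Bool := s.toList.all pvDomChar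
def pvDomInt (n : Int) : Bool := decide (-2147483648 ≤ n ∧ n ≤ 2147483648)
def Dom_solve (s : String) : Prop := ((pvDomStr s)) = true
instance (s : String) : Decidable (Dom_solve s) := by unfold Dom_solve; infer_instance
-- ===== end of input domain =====

-- B replaces A's fused single pass (running minimum + incrementally reset counter)
-- with a compute-the-prefix-balances-then-scan decomposition (min, then count); alternative, same cost.


-- ===== PORT A =====
-- A's for-loop over the string, state (p, t, res)
def solveLoop : Int → Int → Int → List Char → Int × Int × Int
  | p, t, res, [] => (p, t, res)
  | p, t, res, i :: rest =>
    let p' := if i = '(' then p + 1 else p - 1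
    let tr : Int × Int := if p' < t then (p', 0) else (t, res)
    let res' := if tr.1 = p' then tr.2 + 1 else tr.2
    solveLoop p' tr.1 res' rest

def solve (s : String) : Int :=
  let r := solveLoop 0 0 0 s.toList
  if r.1 ≠ 0 then 0 else r.2.2

-- ===== PORT B =====
-- B's first loop: build the list of running prefix balances (and the total b)
def solveAltLoop : Int → List Int → List Char → Int × List Int
  | b, ps, [] => (b, ps)
  | b, ps, c :: rest =>
    let b' := b + (if c = '(' then 1 else -1)
    solveAltLoop b' (ps ++ [b']) rest

def solve_alt (s : String) : Int :=
  let r := solveAltLoop 0 [] s.toList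
  if r.2 = [] ∨ r.1 ≠ 0 then 0
  else
    match PySem.List.min? r.2 (fun x => x) with
    | some m => (PySem.List.count r.2 m : Int)
    | none => 0   -- unreachable: r.2 ≠ [] in this branch

-- ===== PRECONDITION & SPEC =====
def Spec_solve (s : String) (out : Int) : Prop := out = solve_alt s
instance (s : String) (out : Int) : Decidable (Spec_solve s out) := by unfold Spec_solve; infer_instance

-- ===== CLAIM (what is proved, stated in full; the proofs are below) =====
def Claim_equal_solve : Prop := ∀ (s : String), Dom_solve s → Spec_solve s (solve s)

-- ===== LEMMAS AND PROOFS =====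

-- the list of running prefix balances starting from p
def bals : Int → List Char → List Int
  | _, [] => []
  | p, c :: rest =>
    let p' := p + (if c = '(' then 1 else -1)
    p' :: bals p' rest

theorem foldl_min_le_init (l : List Int) (a : Int) : List.foldl min a l ≤ a := by
  induction l generalizing a with
  | nil => simp
  | cons c cs ih => exact le_trans (ih (min a c)) (min_le_left _ _)

theorem foldl_min_le_mem (l : List Int) (a x : Int) (hx : x ∈ l) :
    List.foldl min a l ≤ x := by
  induction l generalizing a with
  | nil => simp at hx
  | cons c cs ih =>
    rcases List.mem_cons.mp hx with h | h
    · subst h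
      exact le_trans (foldl_min_le_init cs (min a x)) (min_le_right _ _)
    · exact ih (min a c) h

theorem foldl_min_min (l : List Int) (a b : Int) :
    List.foldl min (min a b) l = min a (List.foldl min b l) := by
  induction l generalizing b with
  | nil => simp
  | cons c cs ih =>
    simp only [List.foldl_cons, min_assoc, ih]

theorem getLastD_mem (l : List Int) (d : Int) (h : l ≠ []) : l.getLastD d ∈ l := by
  induction l generalizing d with
  | nil => simp at h
  | cons c cs ih =>
    rw [List.getLastD_cons]
    cases cs with
    | nil => simp
    | cons e es => exact List.mem_cons_of_mem _ (ih e (by simp))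

theorem solveAltLoop_eq (l : List Char) (b : Int) (ps : List Int) :
    solveAltLoop b ps l = ((bals b l).getLastD b, ps ++ bals b l) := by
  induction l generalizing b ps with
  | nil => simp [solveAltLoop, bals]
  | cons c cs ih =>
    simp only [solveAltLoop, bals, ih, List.getLastD_cons, List.append_assoc,
      List.singleton_append]

-- characterisation of A's fused loop: final p is the last prefix balance, final t is the
-- running minimum, final res counts prefix balances equal to that minimum
theorem count_cons_int (p' M : Int) (l : List Int) :
    (PySem.List.count (p' :: l) M : Int)
      = (if p' = M then 1 else 0) + (PySem.List.count l M : Int) := by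
  simp [PySem.List.count, List.count_cons]
  by_cases h : p' = M
  · simp [h]
    omega
  · simp [h]

theorem solveLoop_eq (l : List Char) (p t res : Int) :
    solveLoop p t res l =
      ((bals p l).getLastD p,
       List.foldl min t (bals p l),
       (if List.foldl min t (bals p l) = t then res else 0)
         + (PySem.List.count (bals p l) (List.foldl min t (bals p l)) : Int)) := by
  induction l generalizing p t res with
  | nil => simp [solveLoop, bals, PySem.List.count]
  | cons c cs ih =>
    simp only [solveLoop, bals]
    rw [show (if c = '(' then p + 1 else p - 1) = p + (if c = '(' then 1 else -1) by
      split <;> ring]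
    suffices h : ∀ p' : Int,
        solveLoop p' (if p' < t then (p', (0:Int)) else (t, res)).1
          (if (if p' < t then (p', (0:Int)) else (t, res)).1 = p'
            then (if p' < t then (p', (0:Int)) else (t, res)).2 + 1
            else (if p' < t then (p', (0:Int)) else (t, res)).2) cs =
        ((p' :: bals p' cs).getLastD p,
         List.foldl min t (p' :: bals p' cs),
         (if List.foldl min t (p' :: bals p' cs) = t then res else 0)
           + (PySem.List.count (p' :: bals p' cs)
               (List.foldl min t (p' :: bals p' cs)) : Int)) by
      exact h _
    intro p'
    rw [List.getLastD_cons, List.foldl_cons]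
    by_cases hlt : p' < t
    · -- new minimum found: t becomes p', res resets to 1
      have hmin : min t p' = p' := min_eq_right (le_of_lt hlt)
      simp only [if_pos hlt, ih, hmin]
      have hM := foldl_min_le_init (bals p' cs) p'
      rw [count_cons_int]
      simp only [Prod.mk.injEq]
      refine ⟨trivial, trivial, ?_⟩
      split_ifs <;> omega
    · -- p' ≥ t: minimum unchanged; res increments exactly when p' = t
      have hmin : min t p' = t := min_eq_left (le_of_not_gt hlt)
      simp only [if_neg hlt, ih, hmin]
      have hM := foldl_min_le_init (bals p' cs) t
      rw [count_cons_int]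
      simp only [Prod.mk.injEq]
      refine ⟨trivial, trivial, ?_⟩
      by_cases hpt : t = p'
      · simp only [hpt]
        split_ifs <;> omega
      · simp only [if_neg hpt]
        split_ifs <;> omega

theorem solve_eq_alt (s : String) : solve s = solve_alt s := by
  unfold solve solve_alt
  simp only [solveLoop_eq, solveAltLoop_eq, List.nil_append]
  cases s.toList with
  | nil => simp [bals, PySem.List.count]
  | cons c cs =>
    obtain ⟨p1, B, hps⟩ : ∃ a b, bals 0 (c :: cs) = a :: b := ⟨_, _, rfl⟩
    rw [hps]
    by_cases hlast : (p1 :: B).getLastD 0 = 0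
    · have hmem : (p1 :: B).getLastD 0 ∈ p1 :: B := getLastD_mem _ _ (by simp)
      have hle : List.foldl min p1 B ≤ 0 := by
        conv_rhs => rw [← hlast]
        rcases List.mem_cons.mp hmem with h | h
        · rw [h]; exact foldl_min_le_init _ _
        · exact foldl_min_le_mem _ _ _ h
      have hfold : List.foldl min 0 (p1 :: B) = List.foldl min p1 B := by
        rw [List.foldl_cons, foldl_min_min]
        exact min_eq_right hle
      rw [PySem.List.min?_id_cons, if_neg (not_not_intro hlast), List.foldl_cons,
        foldl_min_min, min_eq_right hle, ite_self, zero_add,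
        if_neg (show ¬(p1 :: B = [] ∨ (p1 :: B).getLastD 0 ≠ 0) from
          fun h => h.elim (fun h1 => List.cons_ne_nil _ _ h1) (fun h2 => h2 hlast))]
    · rw [if_pos hlast, if_pos (Or.inr hlast)]

-- ===== VERDICT (by name: the statement is the Claim_ definition above) =====
theorem solve_spec : Claim_equal_solve := by
  intro s _
  unfold Spec_solve
  exact solve_eq_alt s
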